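-- pv_equiv track=rewrite | github.com/jonathanprocter/therapy-transcript-pipeline | src/pdf_extractor.py | extract_client_name
-- ===== SOURCE A (Python) =====
-- def extract_client_name(text_content):
--     """
--     Attempt to extract client name from text content.
--
--     Args:
--         text_content: Text content of the PDF
--
--     Returns:
--         str: Client name or None if not found
--     """
--     # Look for common patterns in therapy transcripts
--     # Example: "Client: John Smith" or "Patient: John Smith"
--
--     lines = text_content.split('\n')
--     for line in lines[:20]:  # Check first 20 lines
--         line = line.strip()
--
--         # Check for "Client:" or "Patient:" prefix
--         if line.lower().startswith("client:") and len(line) > 7: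
--             return line[7:].strip()
--
--         if line.lower().startswith("patient:") and len(line) > 8:
--             return line[8:].strip()
--
--         # Check for "Name:" prefix
--         if line.lower().startswith("name:") and len(line) > 5:
--             return line[5:].strip()
--
--     return None
-- ===== SOURCE B (Python) =====
-- def extract_client_name(text_content):
--     """Per-label passes: for each label find the earliest matching line
--     (labels are mutually exclusive per line), then keep the overall earliest."""
--     lines = [l.strip() for l in text_content.split('\n')[:20]]
--     best = None
--     for label in ("client:", "patient:", "name:"):
--         for i, line in enumerate(lines):
--             if line.lower().startswith(label) and len(line) > len(label):
--                 if best is None or i < best[0]: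
--                     best = (i, line[len(label):].strip())
--                 break
--     return None if best is None else best[1]
-- ===== Notes on version B (the rewrite author's own statement) =====
-- stated objective: alternative
-- what changed: B replaces A's single pass with three per-line branches by one strip pass followed by one scan per label that records the earliest matching line index, merging candidates by minimum index (correct because the labels are mutually exclusive on any one line).
import Mathlib
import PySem

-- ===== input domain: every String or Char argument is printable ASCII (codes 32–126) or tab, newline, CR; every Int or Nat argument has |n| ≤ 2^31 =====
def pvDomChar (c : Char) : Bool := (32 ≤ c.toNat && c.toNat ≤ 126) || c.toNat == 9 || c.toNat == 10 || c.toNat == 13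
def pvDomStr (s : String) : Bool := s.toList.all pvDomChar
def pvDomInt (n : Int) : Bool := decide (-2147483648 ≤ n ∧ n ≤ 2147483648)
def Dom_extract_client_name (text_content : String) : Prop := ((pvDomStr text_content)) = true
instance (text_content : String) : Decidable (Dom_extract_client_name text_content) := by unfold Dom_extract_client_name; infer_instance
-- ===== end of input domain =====

-- B: instead of A's single pass with three per-line branches, one strip pass then one scan per label
-- recording the earliest matching line index, merged by minimum index (objective: alternative).

-- ===== PORT A =====
-- per-line body of A's loop: the three prefix checks, in A's order (some = early return)
def pvStepA (l : String) : Option String :=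
  if PySem.Str.startswith (PySem.Str.lower l) "client:" = true ∧ PySem.Str.len l > 7 then
    some (PySem.Str.strip (PySem.Str.slice l (some 7) none))
  else if PySem.Str.startswith (PySem.Str.lower l) "patient:" = true ∧ PySem.Str.len l > 8 then
    some (PySem.Str.strip (PySem.Str.slice l (some 8) none))
  else if PySem.Str.startswith (PySem.Str.lower l) "name:" = true ∧ PySem.Str.len l > 5 then
    some (PySem.Str.strip (PySem.Str.slice l (some 5) none))
  else none

def pvLoopA : List String → Option String
  | [] => none
  | line :: rest =>
    match pvStepA (PySem.Str.strip line) with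
    | some r => some r
    | none => pvLoopA rest

def extract_client_name (text_content : String) : Option String :=
  match PySem.Str.split? text_content "\n" with
  | some lines => pvLoopA (PySem.List.slice lines none (some 20))
  | none => none

-- ===== PORT B =====
-- port of Python's enumerate over the (already stripped) lines
def pvEnumFrom (k : Nat) : List String → List (Nat × String)
  | [] => []
  | x :: xs => (k, x) :: pvEnumFrom (k + 1) xs

-- Source B's inner loop: first (index, extracted value) for one label, else none
def pvFirstMatch (label : String) : List (Nat × String) → Option (Nat × String)
  | [] => none
  | (i, line) :: rest =>
    if PySem.Str.startswith (PySem.Str.lower line) label = true ∧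
        PySem.Str.len line > PySem.Str.len label then
      some (i, PySem.Str.strip (PySem.Str.slice line (some (PySem.Str.len label)) none))
    else pvFirstMatch label rest

-- Source B's best-candidate update: keep the candidate with the smaller line index
def pvUpd (best cand : Option (Nat × String)) : Option (Nat × String) :=
  match cand with
  | none => best
  | some c =>
    match best with
    | none => some c
    | some b => if c.1 < b.1 then some c else some b

def extract_client_name_alt (text_content : String) : Option String :=
  match PySem.Str.split? text_content "\n" with
  | some ls =>
    let lines := (PySem.List.slice ls none (some 20)).map PySem.Str.strip
    let best := ["client:", "patient:", "name:"].foldl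
      (fun best label => pvUpd best (pvFirstMatch label (pvEnumFrom 0 lines))) none
    best.map Prod.snd
  | none => none

-- ===== PRECONDITION & SPEC =====
def Spec_extract_client_name (text_content : String) (out : Option String) : Prop := out = extract_client_name_alt text_content
instance (text_content : String) (out : Option String) : Decidable (Spec_extract_client_name text_content out) := by unfold Spec_extract_client_name; infer_instance

-- ===== CLAIM (what is proved, stated in full; the proofs are below) =====
def Claim_equal_extract_client_name : Prop := ∀ (text_content : String), Dom_extract_client_name text_content → Spec_extract_client_name text_content (extract_client_name text_content)

-- ===== LEMMAS AND PROOFS =====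

-- any index produced by pvFirstMatch on pvEnumFrom k is ≥ k
theorem pvFirst_ge (label : String) (xs : List String) : ∀ (k : Nat) (i : Nat) (v : String),
    pvFirstMatch label (pvEnumFrom k xs) = some (i, v) → k ≤ i := by
  induction xs with
  | nil => intro k i v h; simp [pvEnumFrom, pvFirstMatch] at h
  | cons x xs ih =>
    intro k i v h
    simp only [pvEnumFrom, pvFirstMatch] at h
    split_ifs at h with hc
    · cases h; omega
    · have := ih (k + 1) i v h; omega

-- two labels both matched at the start of the same lowered line are prefix-comparable
theorem pvExcl (l p q : String)
    (hp : PySem.Str.startswith (PySem.Str.lower l) p = true)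
    (hq : PySem.Str.startswith (PySem.Str.lower l) q = true) :
    p.toList <+: q.toList ∨ q.toList <+: p.toList := by
  rw [PySem.Str.startswith_eq, PySem.Str.toList_lower, PySem.Chars.startswith_iff] at hp hq
  by_cases hl : p.toList.length ≤ q.toList.length
  · left
    rw [List.prefix_iff_eq_take.mp hp, List.prefix_iff_eq_take.mp hq]
    exact List.take_isPrefix_take.mpr (Or.inl hl)
  · right
    rw [List.prefix_iff_eq_take.mp hq, List.prefix_iff_eq_take.mp hp]
    exact List.take_isPrefix_take.mpr (Or.inl (by omega))

theorem pvExclCP (l : String)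
    (hp : PySem.Str.startswith (PySem.Str.lower l) "client:" = true)
    (hq : PySem.Str.startswith (PySem.Str.lower l) "patient:" = true) : False := by
  rcases pvExcl l _ _ hp hq with h | h
  · exact absurd h (by decide)
  · exact absurd h (by decide)

theorem pvExclCN (l : String)
    (hp : PySem.Str.startswith (PySem.Str.lower l) "client:" = true)
    (hq : PySem.Str.startswith (PySem.Str.lower l) "name:" = true) : False := by
  rcases pvExcl l _ _ hp hq with h | h
  · exact absurd h (by decide)
  · exact absurd h (by decide)

theorem pvExclPN (l : String)
    (hp : PySem.Str.startswith (PySem.Str.lower l) "patient:" = true)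
    (hq : PySem.Str.startswith (PySem.Str.lower l) "name:" = true) : False := by
  rcases pvExcl l _ _ hp hq with h | h
  · exact absurd h (by decide)
  · exact absurd h (by decide)

theorem pvLenC : PySem.Str.len "client:" = 7 := by decide
theorem pvLenP : PySem.Str.len "patient:" = 8 := by decide
theorem pvLenN : PySem.Str.len "name:" = 5 := by decide

-- the main invariant: B's three per-label first matches, merged by minimum index, equal A's loop
theorem pvMain (raw : List String) : ∀ (k : Nat),
    (pvUpd (pvUpd (pvUpd none
        (pvFirstMatch "client:" (pvEnumFrom k (raw.map PySem.Str.strip))))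
        (pvFirstMatch "patient:" (pvEnumFrom k (raw.map PySem.Str.strip))))
        (pvFirstMatch "name:" (pvEnumFrom k (raw.map PySem.Str.strip)))).map Prod.snd
      = pvLoopA raw := by
  induction raw with
  | nil => intro k; simp [pvEnumFrom, pvFirstMatch, pvUpd, pvLoopA]
  | cons line rest ih =>
    intro k
    set s := PySem.Str.strip line with hs
    have hmap : (line :: rest).map PySem.Str.strip = s :: rest.map PySem.Str.strip := rfl
    rw [hmap]
    simp only [pvEnumFrom, pvFirstMatch, pvLenC, pvLenP, pvLenN]
    by_cases h1 : PySem.Str.startswith (PySem.Str.lower s) "client:" = true ∧ PySem.Str.len s > 7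
    · rw [if_pos h1]
      have h2 : ¬ (PySem.Str.startswith (PySem.Str.lower s) "patient:" = true ∧
          PySem.Str.len s > 8) := fun hc => pvExclCP s h1.1 hc.1
      have h3 : ¬ (PySem.Str.startswith (PySem.Str.lower s) "name:" = true ∧
          PySem.Str.len s > 5) := fun hc => pvExclCN s h1.1 hc.1
      rw [if_neg h2, if_neg h3]
      have hA : pvLoopA (line :: rest) =
          some (PySem.Str.strip (PySem.Str.slice s (some 7) none)) := by
        simp only [pvLoopA, ← hs, pvStepA, if_pos h1]
      rw [hA]
      cases hP : pvFirstMatch "patient:" (pvEnumFrom (k + 1) (rest.map PySem.Str.strip)) with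
      | none =>
        cases hN : pvFirstMatch "name:" (pvEnumFrom (k + 1) (rest.map PySem.Str.strip)) with
        | none => simp [pvUpd]
        | some c =>
          have := pvFirst_ge _ _ _ c.1 c.2 (by simpa using hN)
          simp [pvUpd, show ¬ (c.1 < k) by omega]
      | some c =>
        have := pvFirst_ge _ _ _ c.1 c.2 (by simpa using hP)
        cases hN : pvFirstMatch "name:" (pvEnumFrom (k + 1) (rest.map PySem.Str.strip)) with
        | none => simp [pvUpd, show ¬ (c.1 < k) by omega]
        | some d =>
          have := pvFirst_ge _ _ _ d.1 d.2 (by simpa using hN)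
          simp [pvUpd, show ¬ (c.1 < k) by omega, show ¬ (d.1 < k) by omega]
    · rw [if_neg h1]
      by_cases h2 : PySem.Str.startswith (PySem.Str.lower s) "patient:" = true ∧
          PySem.Str.len s > 8
      · rw [if_pos h2]
        have h3 : ¬ (PySem.Str.startswith (PySem.Str.lower s) "name:" = true ∧
            PySem.Str.len s > 5) := fun hc => pvExclPN s h2.1 hc.1
        rw [if_neg h3]
        have hA : pvLoopA (line :: rest) =
            some (PySem.Str.strip (PySem.Str.slice s (some 8) none)) := by
          simp only [pvLoopA, ← hs, pvStepA, if_neg h1, if_pos h2]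
        rw [hA]
        cases hC : pvFirstMatch "client:" (pvEnumFrom (k + 1) (rest.map PySem.Str.strip)) with
        | none =>
          cases hN : pvFirstMatch "name:" (pvEnumFrom (k + 1) (rest.map PySem.Str.strip)) with
          | none => simp [pvUpd]
          | some d =>
            have := pvFirst_ge _ _ _ d.1 d.2 (by simpa using hN)
            simp [pvUpd, show ¬ (d.1 < k) by omega]
        | some c =>
          have := pvFirst_ge _ _ _ c.1 c.2 (by simpa using hC)
          cases hN : pvFirstMatch "name:" (pvEnumFrom (k + 1) (rest.map PySem.Str.strip)) with
          | none => simp [pvUpd, show k < c.1 by omega]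
          | some d =>
            have := pvFirst_ge _ _ _ d.1 d.2 (by simpa using hN)
            simp [pvUpd, show k < c.1 by omega, show ¬ (d.1 < k) by omega]
      · rw [if_neg h2]
        by_cases h3 : PySem.Str.startswith (PySem.Str.lower s) "name:" = true ∧
            PySem.Str.len s > 5
        · rw [if_pos h3]
          have hA : pvLoopA (line :: rest) =
              some (PySem.Str.strip (PySem.Str.slice s (some 5) none)) := by
            simp only [pvLoopA, ← hs, pvStepA, if_neg h1, if_neg h2, if_pos h3]
          rw [hA]
          cases hC : pvFirstMatch "client:" (pvEnumFrom (k + 1) (rest.map PySem.Str.strip)) with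
          | none =>
            cases hP : pvFirstMatch "patient:" (pvEnumFrom (k + 1) (rest.map PySem.Str.strip)) with
            | none => simp [pvUpd]
            | some c =>
              have := pvFirst_ge _ _ _ c.1 c.2 (by simpa using hP)
              simp [pvUpd, show k < c.1 by omega]
          | some c =>
            have := pvFirst_ge _ _ _ c.1 c.2 (by simpa using hC)
            cases hP : pvFirstMatch "patient:" (pvEnumFrom (k + 1) (rest.map PySem.Str.strip)) with
            | none => simp [pvUpd, show k < c.1 by omega]
            | some d =>
              have := pvFirst_ge _ _ _ d.1 d.2 (by simpa using hP)
              by_cases hdc : d.1 < c.1 <;>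
                simp [pvUpd, hdc, show k < c.1 by omega, show k < d.1 by omega]
        · rw [if_neg h3]
          have hA : pvLoopA (line :: rest) = pvLoopA rest := by
            simp only [pvLoopA, ← hs, pvStepA, if_neg h1, if_neg h2, if_neg h3]
          rw [hA]
          exact ih (k + 1)

-- ===== VERDICT (by name: the statement is the Claim_ definition above) =====
theorem extract_client_name_spec : Claim_equal_extract_client_name := by
  intro text_content _
  unfold Spec_extract_client_name extract_client_name extract_client_name_alt
  cases PySem.Str.split? text_content "\n" with
  | none => rfl
  | some lines =>
    simp only [List.foldl]
    exact (pvMain (PySem.List.slice lines none (some 20)) 0).symm
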